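-- pv_equiv track=rewrite | github.com/AmedeoBiolatti/santa2025 | cpp/scripts/analyze_deep_branches.py | get_leaves_under
-- ===== SOURCE A (Python) =====
-- def get_leaves_under(node_idx: int, num_internal: int) -> list:
--     """Get all leaf indices under a node."""
--     if node_idx >= num_internal:
--         return [node_idx - num_internal]
--     leaves = []
--     stack = [node_idx]
--     while stack:
--         n = stack.pop()
--         if n >= num_internal:
--             leaves.append(n - num_internal)
--         else:
--             stack.append(2*n + 1)
--             stack.append(2*n + 2)
--     return leaves
-- ===== SOURCE B (Python) =====
-- def get_leaves_under(node_idx: int, num_internal: int) -> list: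
--     """Get all leaf indices under a node (recursive, right child first)."""
--     if node_idx >= num_internal:
--         return [node_idx - num_internal]
--     return (get_leaves_under(2*node_idx + 2, num_internal)
--             + get_leaves_under(2*node_idx + 1, num_internal))
-- ===== Notes on version B (the rewrite author's own statement) =====
-- stated objective: simpler
-- what changed: Replaced the explicit-stack while loop that accumulates leaves into a list with a direct recursion over the implicit tree (right subtree first, then left, concatenated), folding the top-level leaf guard into the base case.
import Mathlib
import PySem

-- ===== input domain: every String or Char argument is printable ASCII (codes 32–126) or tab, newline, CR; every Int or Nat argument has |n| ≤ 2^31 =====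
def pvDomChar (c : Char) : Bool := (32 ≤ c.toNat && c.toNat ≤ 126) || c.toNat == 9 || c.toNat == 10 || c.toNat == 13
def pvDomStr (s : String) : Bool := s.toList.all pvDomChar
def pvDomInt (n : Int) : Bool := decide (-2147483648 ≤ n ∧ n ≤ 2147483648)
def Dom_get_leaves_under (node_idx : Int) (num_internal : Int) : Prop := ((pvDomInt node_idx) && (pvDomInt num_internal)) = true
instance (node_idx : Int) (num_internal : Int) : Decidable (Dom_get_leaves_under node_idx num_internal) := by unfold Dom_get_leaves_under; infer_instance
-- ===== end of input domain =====

-- B replaces A's explicit-stack-and-accumulator loop with a direct recursion over the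
-- implicit tree (right child first, concatenated); objective: simpler.

-- ===== PORT A =====
-- termination lemmas for the ports (cited by name in decreasing_by)
theorem pvLeftLt (N n : Int) (h : ¬(N ≤ n ∨ n < 0)) :
    (N - (2*n + 1)).toNat < (N - n).toNat := by omega
theorem pvRightLt (N n : Int) (h : ¬(N ≤ n ∨ n < 0)) :
    (N - (2*n + 2)).toNat < (N - n).toNat := by omega
theorem pvRightLt' (N n : Int) (h1 : ¬ N ≤ n) (h2 : ¬ n < 0) :
    (N - (2*n + 2)).toNat < (N - n).toNat := by omega
theorem pvLeftLt' (N n : Int) (h1 : ¬ N ≤ n) (h2 : ¬ n < 0) :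
    (N - (2*n + 1)).toNat < (N - n).toNat := by omega

-- Measure used only for termination of the loop port: size of the subtree under n.
def pvASize (N n : Int) : Nat :=
  if N ≤ n ∨ n < 0 then 1
  else 1 + pvASize N (2*n + 1) + pvASize N (2*n + 2)
termination_by (N - n).toNat
decreasing_by
  · exact pvLeftLt N n (by assumption)
  · exact pvRightLt N n (by assumption)

theorem pvASize_pos (N n : Int) : 1 ≤ pvASize N n := by
  unfold pvASize; split <;> omega

theorem pvASize_split (N n : Int) (h1 : ¬ N ≤ n) (h2 : ¬ n < 0) :
    pvASize N n = 1 + pvASize N (2*n + 1) + pvASize N (2*n + 2) := by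
  conv_lhs => rw [pvASize]
  rw [if_neg]; omega

theorem pvPopLt (N n : Int) (rest : List Int) :
    ((rest.map (pvASize N)).sum) < (((n :: rest).map (pvASize N)).sum) := by
  have := pvASize_pos N n
  simp only [List.map_cons, List.sum_cons]; omega

theorem pvPushLt (N n : Int) (rest : List Int) (h1 : ¬ N ≤ n) (h2 : ¬ n < 0) :
    ((((2*n + 2) :: (2*n + 1) :: rest).map (pvASize N)).sum) < (((n :: rest).map (pvASize N)).sum) := by
  have := pvASize_split N n h1 h2
  simp only [List.map_cons, List.sum_cons]; omega

-- The while loop of A, state = (stack, leaves). The 'n < 0' branch is a totality guard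
-- only: on such inputs Python A loops forever (those inputs are outside Pre_).
def get_leaves_under_loop (N : Int) (stack leaves : List Int) : List Int :=
  match stack with
  | [] => leaves
  | n :: rest =>
    if N ≤ n then get_leaves_under_loop N rest (leaves ++ [n - N])
    else if n < 0 then get_leaves_under_loop N rest leaves
    else get_leaves_under_loop N ((2*n + 2) :: (2*n + 1) :: rest) leaves
termination_by (stack.map (pvASize N)).sum
decreasing_by
  · exact pvPopLt N n rest
  · exact pvPopLt N n rest
  · exact pvPushLt N n rest (by assumption) (by assumption)

def get_leaves_under (node_idx : Int) (num_internal : Int) : List Int :=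
  if num_internal ≤ node_idx then [node_idx - num_internal]
  else get_leaves_under_loop num_internal [node_idx] []

-- ===== PORT B =====
-- The 'n < 0' branch is a totality guard only: there Python B hits RecursionError
-- (outside Pre_).
def get_leaves_under_alt (node_idx : Int) (num_internal : Int) : List Int :=
  if num_internal ≤ node_idx then [node_idx - num_internal]
  else if node_idx < 0 then []
  else get_leaves_under_alt (2*node_idx + 2) num_internal
       ++ get_leaves_under_alt (2*node_idx + 1) num_internal
termination_by (num_internal - node_idx).toNat
decreasing_by
  · exact pvRightLt' num_internal node_idx (by assumption) (by assumption)
  · exact pvLeftLt' num_internal node_idx (by assumption) (by assumption)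

-- ===== PRECONDITION & SPEC =====
-- Pre_ excludes negative node_idx below num_internal: there Python A loops forever
-- (and Python B overflows the recursion), so neither returns.
def Pre_get_leaves_under (node_idx : Int) (num_internal : Int) : Prop :=
  num_internal ≤ node_idx ∨ 0 ≤ node_idx
instance (node_idx : Int) (num_internal : Int) : Decidable (Pre_get_leaves_under node_idx num_internal) := by unfold Pre_get_leaves_under; infer_instance
def pvWitness_get_leaves_under : Int × Int := (0, 4)
def Spec_get_leaves_under (node_idx : Int) (num_internal : Int) (out : List Int) : Prop := out = get_leaves_under_alt node_idx num_internal
instance (node_idx : Int) (num_internal : Int) (out : List Int) : Decidable (Spec_get_leaves_under node_idx num_internal out) := by unfold Spec_get_leaves_under; infer_instance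

-- ===== CLAIM (what is proved, stated in full; the proofs are below) =====
def Claim_equal_get_leaves_under : Prop := ∀ (node_idx : Int) (num_internal : Int), Dom_get_leaves_under node_idx num_internal → Pre_get_leaves_under node_idx num_internal → Spec_get_leaves_under node_idx num_internal (get_leaves_under node_idx num_internal)

-- ===== LEMMAS AND PROOFS =====

-- On a stack of valid nodes (0 ≤ m, or m ≥ N), A's loop equals the concatenation of
-- B's recursion over the stack, appended to the leaves accumulated so far.
theorem loop_eq_flatten (N : Int) (stack leaves : List Int)
    (hs : ∀ m ∈ stack, 0 ≤ m ∨ N ≤ m) :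
    get_leaves_under_loop N stack leaves
      = leaves ++ (stack.map (fun n => get_leaves_under_alt n N)).flatten := by
  revert hs
  fun_induction get_leaves_under_loop N stack leaves with
  | case1 => intro _; simp
  | case2 acc x tl h ih =>
    intro hs
    rw [ih (fun m hm => hs m (List.mem_cons_of_mem _ hm))]
    simp only [List.map_cons, List.flatten_cons]
    rw [get_leaves_under_alt, if_pos h]; simp
  | case3 acc x tl h h' ih =>
    intro hs
    rcases hs x List.mem_cons_self with h0 | hN
    · omega
    · omega
  | case4 acc x tl h h' ih =>
    intro hs
    have htl : ∀ m ∈ tl, 0 ≤ m ∨ N ≤ m := fun m hm => hs m (List.mem_cons_of_mem _ hm)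
    have hx : 0 ≤ x := by omega
    rw [ih (by
      intro m hm
      simp only [List.mem_cons] at hm
      rcases hm with h1 | h1 | hm
      · left; omega
      · left; omega
      · exact htl m hm)]
    simp only [List.map_cons, List.flatten_cons]
    conv_rhs => rw [get_leaves_under_alt]
    rw [if_neg h, if_neg h']; simp

-- ===== VERDICT (by name: the statement is the Claim_ definition above) =====
theorem get_leaves_under_spec : Claim_equal_get_leaves_under := by
  intro n N _ hpre
  unfold Spec_get_leaves_under get_leaves_under
  split
  · rename_i h; rw [get_leaves_under_alt, if_pos h]
  · rename_i h
    have hn : 0 ≤ n := by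
      rcases hpre with hN | h0
      · exact absurd hN h
      · exact h0
    rw [loop_eq_flatten N [n] [] (by intro m hm; rw [List.mem_singleton] at hm; subst hm; left; exact hn)]
    simp
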